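-- pv_equiv track=rewrite | github.com/abalroar/baratex | latam-fares/utils/dates.py | month_range
-- ===== SOURCE A (Python) =====
-- def month_range(start_month: int, start_year: int, n_months: int) -> list[tuple[int, int]]:
--     """Retorna lista de (month, year) para n_months meses a partir de start."""
--     if n_months < 1:
--         return []
--
--     items: list[tuple[int, int]] = []
--     month = start_month
--     year = start_year
--
--     for _ in range(n_months):
--         items.append((month, year))
--         month += 1
--         if month > 12:
--             month = 1
--             year += 1
--
--     return items
-- ===== SOURCE B (Python) =====
-- def month_range(start_month: int, start_year: int, n_months: int) -> list[tuple[int, int]]: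
--     """Each (month, year) computed in closed form from the month offset since year start."""
--     base = start_month - 1
--     return [((base + i) % 12 + 1, start_year + (base + i) // 12)
--             for i in range(n_months)]
-- ===== Notes on version B (the rewrite author's own statement) =====
-- stated objective: simpler
-- what changed: Replaces the stateful month/year-carrying loop with a single comprehension computing each pair in closed form via divmod arithmetic; Pre_ excludes positive-length requests whose start_month lies outside the natural calendar domain 1..12, on which A emits unnormalized month numbers (an artefact of its state-carrying loop) while B normalizes them.
-- outside the precondition, e.g. on month_range(13, 2020, 2): A returns [(13, 2020), (1, 2021)], B returns [(1, 2021), (2, 2021)]; on month_range(0, 2020, 1): A returns [(0, 2020)], B returns [(12, 2019)]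
import Mathlib
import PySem

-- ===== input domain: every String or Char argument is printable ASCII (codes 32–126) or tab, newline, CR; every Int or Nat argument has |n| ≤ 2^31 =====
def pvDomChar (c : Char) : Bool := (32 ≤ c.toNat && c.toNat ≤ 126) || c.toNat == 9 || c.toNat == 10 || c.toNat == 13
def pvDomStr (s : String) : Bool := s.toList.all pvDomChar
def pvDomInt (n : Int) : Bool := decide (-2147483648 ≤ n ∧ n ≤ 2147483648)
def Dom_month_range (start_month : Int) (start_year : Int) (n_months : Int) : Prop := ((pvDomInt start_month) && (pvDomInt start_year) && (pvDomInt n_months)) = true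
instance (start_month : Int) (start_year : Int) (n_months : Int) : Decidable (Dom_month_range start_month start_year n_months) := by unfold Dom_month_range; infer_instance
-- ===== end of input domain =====

-- B replaces A's stateful month/year-carrying loop with one closed-form comprehension (divmod arithmetic per index); same O(n) cost, simpler.

-- ===== PORT A =====
-- loop body of A: append (month, year), increment month, wrap on > 12
def pvStepA (st : List (Int × Int) × Int × Int) : List (Int × Int) × Int × Int :=
  let items := st.1 ++ [(st.2.1, st.2.2)]
  let month := st.2.1 + 1
  if month > 12 then (items, 1, st.2.2 + 1) else (items, month, st.2.2)

def month_range (start_month : Int) (start_year : Int) (n_months : Int) : List (Int × Int) :=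
  if n_months < 1 then []
  else
    ((List.range n_months.toNat).foldl (fun st _ => pvStepA st) ([], start_month, start_year)).1

-- ===== PORT B =====
def month_range_alt (start_month : Int) (start_year : Int) (n_months : Int) : List (Int × Int) :=
  let base := start_month - 1
  (List.range n_months.toNat).map
    (fun (i : Nat) => (PySem.Int.mod (base + (i : Int)) 12 + 1,
                       start_year + PySem.Int.floordiv (base + (i : Int)) 12))

-- ===== PRECONDITION & SPEC =====
-- Pre_ admits every non-positive n_months (both results are trivially empty) and otherwise
-- restricts start_month to the natural calendar domain 1..12: on positive-length requests with
-- an out-of-range start month, A's unnormalized month numbers (a literal 13 or 0 in the output)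
-- are an artefact of its state-carrying loop, while B normalizes them.
def Pre_month_range (start_month : Int) (start_year : Int) (n_months : Int) : Prop :=
  n_months < 1 ∨ (1 ≤ start_month ∧ start_month ≤ 12)
instance (start_month : Int) (start_year : Int) (n_months : Int) : Decidable (Pre_month_range start_month start_year n_months) := by unfold Pre_month_range; infer_instance
def pvWitness_month_range : Int × Int × Int := (11, 2020, 4)

def Spec_month_range (start_month : Int) (start_year : Int) (n_months : Int) (out : List (Int × Int)) : Prop := out = month_range_alt start_month start_year n_months
instance (start_month : Int) (start_year : Int) (n_months : Int) (out : List (Int × Int)) : Decidable (Spec_month_range start_month start_year n_months out) := by unfold Spec_month_range; infer_instance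

-- ===== CLAIM (what is proved, stated in full; the proofs are below) =====
def Claim_equal_month_range : Prop := ∀ (start_month : Int) (start_year : Int) (n_months : Int), Dom_month_range start_month start_year n_months → Pre_month_range start_month start_year n_months → Spec_month_range start_month start_year n_months (month_range start_month start_year n_months)

-- ===== LEMMAS AND PROOFS =====

-- the sequence A's loop produces, as a structural recursion on the count
def gspec (m y : Int) : Nat → List (Int × Int)
  | 0 => []
  | n + 1 => (m, y) :: (if m + 1 > 12 then gspec 1 (y + 1) n else gspec (m + 1) y n)

lemma foldA_eq_gspec : ∀ (l : List Nat) (acc : List (Int × Int)) (m y : Int),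
    (l.foldl (fun st _ => pvStepA st) (acc, m, y)).1 = acc ++ gspec m y l.length := by
  intro l
  induction l with
  | nil => intro acc m y; simp [gspec]
  | cons a t ih =>
    intro acc m y
    rw [List.foldl_cons, List.length_cons, gspec]
    by_cases h : m + 1 > 12
    · rw [show pvStepA (acc, m, y) = (acc ++ [(m, y)], 1, y + 1) from by
        simp only [pvStepA]; rw [if_pos h]
      , ih, if_pos h, List.append_assoc]
      rfl
    · rw [show pvStepA (acc, m, y) = (acc ++ [(m, y)], m + 1, y) from by
        simp only [pvStepA]; rw [if_neg h]
      , ih, if_neg h, List.append_assoc]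
      rfl

-- B's closed form with Int emod/ediv (equal to Python's % and // for the positive divisor 12)
def cform (m y : Int) (n : Nat) : List (Int × Int) :=
  (List.range n).map (fun (i : Nat) => ((m - 1 + (i : Int)) % 12 + 1, y + (m - 1 + (i : Int)) / 12))

lemma gspec_eq_cform : ∀ (n : Nat) (m y : Int), 1 ≤ m → m ≤ 12 → gspec m y n = cform m y n := by
  intro n
  induction n with
  | zero => intro m y _ _; simp [gspec, cform]
  | succ n ih =>
    intro m y h1 h2
    rw [gspec]
    have hd : ((m - 1 + ((0 : Nat) : Int)) % 12 + 1, y + (m - 1 + ((0 : Nat) : Int)) / 12) = (m, y) := by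
      have e1 : (m - 1 + ((0 : Nat) : Int)) % 12 = m - 1 := by omega
      have e2 : (m - 1 + ((0 : Nat) : Int)) / 12 = 0 := by omega
      rw [e1, e2]; ring_nf
    rw [show cform m y (n + 1) =
        ((m - 1 + ((0 : Nat) : Int)) % 12 + 1, y + (m - 1 + ((0 : Nat) : Int)) / 12) ::
        (List.range n).map (fun (i : Nat) => ((m - 1 + ((i + 1 : Nat) : Int)) % 12 + 1,
                                              y + (m - 1 + ((i + 1 : Nat) : Int)) / 12)) from by
      simp [cform, List.range_succ_eq_map, List.map_map, Function.comp]]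
    rw [hd]
    by_cases hw : m + 1 > 12
    · have hm : m = 12 := by omega
      rw [if_pos hw, ih 1 (y + 1) (by norm_num) (by norm_num)]
      subst hm
      congr 1
      apply List.map_congr_left
      intro i _
      push_cast
      simp only [Prod.mk.injEq]
      omega
    · rw [if_neg hw, ih (m + 1) y (by omega) (by omega)]
      congr 1
      apply List.map_congr_left
      intro i _
      push_cast
      ring_nf

-- ===== VERDICT (by name: the statement is the Claim_ definition above) =====
theorem month_range_spec : Claim_equal_month_range := by
  intro m y n _ hpre
  unfold Spec_month_range month_range month_range_alt
  by_cases hn : n < 1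
  · have : n.toNat = 0 := by omega
    simp [hn, this]
  · have hm : 1 ≤ m ∧ m ≤ 12 := hpre.resolve_left (by omega)
    rw [if_neg hn, foldA_eq_gspec, List.length_range, List.nil_append,
        gspec_eq_cform n.toNat m y hm.1 hm.2]
    simp only [cform]
    apply List.map_congr_left
    intro i _
    rw [PySem.Int.mod_eq_emod_of_pos (by norm_num), PySem.Int.floordiv_eq_ediv_of_pos (by norm_num)]
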